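-- pv_equiv track=rewrite | github.com/Willpon4/Advising-Buddy | catalog_utils.py | check_prerequisites
-- ===== SOURCE A (Python) =====
-- def check_prerequisites(schedule, catalog):
--     """Check for courses in a schedule with unmet prerequisites.
--
--     Args:
--         schedule (list): The course schedule.
--         catalog (dict): The dictionary containing course information.
--
--     Returns:
--         set: A set of courses with unmet prerequisites.
--     """
--     pre_req_set = set()
--     for sets in schedule:
--         for classes in sets:
--             for course in catalog:
--                 if classes == course:
--                     if catalog[course]['prerequisites'] not in schedule: #good here
--                         pre_req_set.add(course)
--     return pre_req_set
-- ===== SOURCE B (Python) =====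
-- def check_prerequisites(schedule, catalog):
--     """Check for courses in a schedule with unmet prerequisites.
--
--     Two staged passes instead of A's triple nested loop: first compute,
--     once per catalog course, whether its prerequisites are missing from
--     the schedule (building the 'unmet' verdict set); then filter the
--     schedule through that precomputed set.
--     """
--     unmet = {course for course, info in catalog.items()
--              if info.get('prerequisites') not in schedule}
--     flagged = set()
--     for semester in schedule:
--         for course in semester:
--             if course in unmet:
--                 flagged.add(course)
--     return flagged
-- ===== Notes on version B (the rewrite author's own statement) =====
-- stated objective: faster
-- what changed: B inverts the driver: one pass over catalog.items() precomputes a verdict set of courses whose prerequisites are not in the schedule, then a pass over the schedule filters against that set, removing A's per-scheduled-class scan of the whole catalog and repeating the 'not in schedule' test once per catalog course instead of once per scheduled occurrence.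
import Mathlib
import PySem

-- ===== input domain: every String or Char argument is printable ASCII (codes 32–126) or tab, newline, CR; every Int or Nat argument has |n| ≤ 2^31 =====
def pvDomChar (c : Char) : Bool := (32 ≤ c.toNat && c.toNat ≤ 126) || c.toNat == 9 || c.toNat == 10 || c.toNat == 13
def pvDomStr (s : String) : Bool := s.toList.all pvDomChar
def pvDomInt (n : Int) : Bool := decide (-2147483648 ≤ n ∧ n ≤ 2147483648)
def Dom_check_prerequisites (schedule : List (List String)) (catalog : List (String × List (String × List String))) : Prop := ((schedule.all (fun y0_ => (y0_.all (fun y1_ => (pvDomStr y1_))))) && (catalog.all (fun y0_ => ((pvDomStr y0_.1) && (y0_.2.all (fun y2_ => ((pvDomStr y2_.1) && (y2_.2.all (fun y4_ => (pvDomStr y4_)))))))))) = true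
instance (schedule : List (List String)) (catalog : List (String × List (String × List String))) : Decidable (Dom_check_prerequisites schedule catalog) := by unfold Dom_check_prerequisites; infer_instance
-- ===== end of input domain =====

-- B inverts the driver: a first pass over the catalog precomputes the set of courses whose
-- prerequisites are not in the schedule, a second pass filters the schedule by it (objective: faster).

-- ===== PORT A =====
-- the 'getD … []' defaults are reached only where the Python raises KeyError; Pre_ excludes those inputs
def check_prerequisites (schedule : List (List String)) (catalog : List (String × List (String × List String))) : List String :=
  schedule.foldl (fun pre_req_set sets =>
    sets.foldl (fun pre_req_set classes =>
      catalog.foldl (fun pre_req_set p =>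
        if classes = p.1 then
          if ((PySem.Dict.mk ((PySem.Dict.mk catalog).getD p.1 [])).getD "prerequisites" ([] : List String)) ∉ schedule then
            PySem.Set.add pre_req_set p.1
          else pre_req_set
        else pre_req_set) pre_req_set) pre_req_set) []

-- ===== PORT B =====
-- "info.get('prerequisites') not in schedule": a missing key gives None, which never equals a list
def pvCondB (schedule : List (List String)) (info : List (String × List String)) : Bool :=
  match (PySem.Dict.mk info).get? "prerequisites" with
  | none => true
  | some v => decide (v ∉ schedule)

def check_prerequisites_alt (schedule : List (List String)) (catalog : List (String × List (String × List String))) : List String :=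
  let unmet : PySem.Set String :=
    ((PySem.Dict.mk catalog).items).foldl
      (fun s p => if pvCondB schedule p.2 then PySem.Set.add s p.1 else s) []
  schedule.foldl (fun flagged semester =>
    semester.foldl (fun flagged course =>
      if PySem.Set.contains unmet course then PySem.Set.add flagged course else flagged) flagged) []

-- ===== PRECONDITION & SPEC =====
-- Pre_ excludes (a) the inputs on which the Python A raises KeyError: some scheduled class is a
-- catalog key whose course dict has no 'prerequisites' key; and (b) association lists with duplicate
-- catalog keys, which represent no Python dict input at all.
def Pre_check_prerequisites (schedule : List (List String)) (catalog : List (String × List (String × List String))) : Prop :=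
  (catalog.map Prod.fst).Nodup ∧
  ∀ c ∈ schedule.flatten,
    (((PySem.Dict.mk catalog).get? c).all (fun info => (PySem.Dict.mk info).contains "prerequisites")) = true
instance (schedule : List (List String)) (catalog : List (String × List (String × List String))) : Decidable (Pre_check_prerequisites schedule catalog) := by unfold Pre_check_prerequisites; infer_instance

def pvWitness_check_prerequisites : List (List String) × (List (String × List (String × List String))) :=
  ([["A"], ["B"]], [("A", [("prerequisites", ["B"])]), ("B", [("prerequisites", [])])])

def Spec_check_prerequisites (schedule : List (List String)) (catalog : List (String × List (String × List String))) (out : List String) : Prop := out = check_prerequisites_alt schedule catalog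
instance (schedule : List (List String)) (catalog : List (String × List (String × List String))) (out : List String) : Decidable (Spec_check_prerequisites schedule catalog out) := by unfold Spec_check_prerequisites; infer_instance

-- ===== CLAIM (what is proved, stated in full; the proofs are below) =====
def Claim_equal_check_prerequisites : Prop := ∀ (schedule : List (List String)) (catalog : List (String × List (String × List String))), Dom_check_prerequisites schedule catalog → Pre_check_prerequisites schedule catalog → Spec_check_prerequisites schedule catalog (check_prerequisites schedule catalog)

-- ===== LEMMAS AND PROOFS =====

-- adding an element twice is a no-op
theorem pv_set_add_idem {s : PySem.Set String} {x : String} :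
    PySem.Set.add (PySem.Set.add s x) x = PySem.Set.add s x := by
  by_cases h : x ∈ s
  · simp [PySem.Set.add, PySem.Set.contains, h]
  · simp [PySem.Set.add, PySem.Set.contains, h]

-- A's inner scan of (a suffix of) the catalog list equals: add classes iff some key matches and the
-- (whole-catalog) condition holds
theorem pv_inner_scan (schedule : List (List String)) (catalog : List (String × List (String × List String)))
    (classes : String) :
    ∀ (cl : List (String × List (String × List String))) (acc : PySem.Set String),
      cl.foldl (fun pre_req_set p =>
        if classes = p.1 then
          if ((PySem.Dict.mk ((PySem.Dict.mk catalog).getD p.1 [])).getD "prerequisites" ([] : List String)) ∉ schedule then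
            PySem.Set.add pre_req_set p.1
          else pre_req_set
        else pre_req_set) acc
      = if classes ∈ cl.map Prod.fst ∧
           ((PySem.Dict.mk ((PySem.Dict.mk catalog).getD classes [])).getD "prerequisites" ([] : List String)) ∉ schedule then
          PySem.Set.add acc classes
        else acc := by
  intro cl
  induction cl with
  | nil => intro acc; simp
  | cons q cl ih =>
    intro acc
    rw [List.foldl_cons]
    by_cases hq : classes = q.1
    · rw [if_pos hq, ← hq]
      have hm : classes ∈ (q :: cl).map Prod.fst := by simp [hq]
      by_cases hc : ((PySem.Dict.mk ((PySem.Dict.mk catalog).getD classes [])).getD "prerequisites" ([] : List String)) ∉ schedule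
      · by_cases h2 : classes ∈ cl.map Prod.fst
        · rw [if_pos hc, ih, if_pos ⟨h2, hc⟩, if_pos ⟨hm, hc⟩]; exact pv_set_add_idem
        · rw [if_pos hc, ih, if_neg (fun h => h2 h.1), if_pos ⟨hm, hc⟩]
      · rw [if_neg hc, ih, if_neg (fun h => hc h.2), if_neg (fun h => hc h.2)]
    · rw [if_neg hq, ih]
      have hiff : classes ∈ (q :: cl).map Prod.fst ↔ classes ∈ cl.map Prod.fst := by
        simp [hq]
      by_cases h2 : classes ∈ cl.map Prod.fst
      · by_cases hc : ((PySem.Dict.mk ((PySem.Dict.mk catalog).getD classes [])).getD "prerequisites" ([] : List String)) ∉ schedule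
        · rw [if_pos ⟨h2, hc⟩, if_pos ⟨hiff.mpr h2, hc⟩]
        · rw [if_neg (fun h => hc h.2), if_neg (fun h => hc h.2)]
      · rw [if_neg (fun h => h2 h.1), if_neg (fun h => h2 (hiff.mp h.1))]

-- membership in B's verdict set: x was added iff some catalog pair has key x and passes the condition
theorem pv_mem_unmet (schedule : List (List String)) :
    ∀ (l : List (String × List (String × List String))) (s : PySem.Set String) (x : String),
      x ∈ l.foldl (fun s p => if pvCondB schedule p.2 then PySem.Set.add s p.1 else s) s ↔
        x ∈ s ∨ ∃ p ∈ l, p.1 = x ∧ pvCondB schedule p.2 = true := by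
  intro l
  induction l with
  | nil => intro s x; simp
  | cons q l ih =>
    intro s x
    rw [List.foldl_cons]
    by_cases hq : pvCondB schedule q.2 = true
    · rw [if_pos hq, ih]
      constructor
      · rintro (h | h)
        · rcases (PySem.Set.mem_add s q.1 x).mp h with h' | h'
          · exact Or.inl h'
          · exact Or.inr ⟨q, List.mem_cons_self .., h'.symm, hq⟩
        · rcases h with ⟨p, hp, h1, h2⟩; exact Or.inr ⟨p, by simp [hp], h1, h2⟩
      · rintro (h | ⟨p, hp, h1, h2⟩)
        · exact Or.inl ((PySem.Set.mem_add s q.1 x).mpr (Or.inl h))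
        · rcases List.mem_cons.mp hp with heq | hp'
          · exact Or.inl ((PySem.Set.mem_add s q.1 x).mpr (Or.inr (heq ▸ h1).symm))
          · exact Or.inr ⟨p, hp', h1, h2⟩
    · rw [if_neg hq, ih]
      constructor
      · rintro (h | ⟨p, hp, h1, h2⟩)
        · exact Or.inl h
        · exact Or.inr ⟨p, List.mem_cons_of_mem _ hp, h1, h2⟩
      · rintro (h | ⟨p, hp, h1, h2⟩)
        · exact Or.inl h
        · rcases List.mem_cons.mp hp with heq | hp'
          · exact absurd (heq ▸ h2) hq
          · exact Or.inr ⟨p, hp', h1, h2⟩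

-- under Pre_, for a scheduled class, membership in B's verdict set coincides with A's test
theorem pv_unmet_iff_condA (schedule : List (List String)) (catalog : List (String × List (String × List String)))
    (hnd : (catalog.map Prod.fst).Nodup) (c : String)
    (hpre : (((PySem.Dict.mk catalog).get? c).all (fun info => (PySem.Dict.mk info).contains "prerequisites")) = true) :
    (c ∈ ((PySem.Dict.mk catalog).items).foldl
        (fun s p => if pvCondB schedule p.2 then PySem.Set.add s p.1 else s) ([] : PySem.Set String)) ↔
      (c ∈ catalog.map Prod.fst ∧
        ((PySem.Dict.mk ((PySem.Dict.mk catalog).getD c [])).getD "prerequisites" ([] : List String)) ∉ schedule) := by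
  have hnd' : (PySem.Dict.mk catalog).keys.Nodup := by simpa [PySem.Dict.keys] using hnd
  rw [pv_mem_unmet]
  simp only [List.mem_nil_iff, false_or]
  constructor
  · rintro ⟨p, hp, h1, h2⟩
    have hget : (PySem.Dict.mk catalog).get? p.1 = some p.2 :=
      (PySem.Dict.get?_eq_some_iff_mem_items _ _ _ hnd').mpr (by simpa using hp)
    subst h1
    have hk : p.1 ∈ catalog.map Prod.fst := by
      have := PySem.Dict.mem_keys_of_mem_items (PySem.Dict.mk catalog) (by simpa using hp)
      simpa [PySem.Dict.keys] using this
    refine ⟨hk, ?_⟩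
    have hcont : (PySem.Dict.mk p.2).contains "prerequisites" = true := by
      rw [hget] at hpre; simpa using hpre
    rw [PySem.Dict.contains_eq_isSome_get?] at hcont
    rcases hv : (PySem.Dict.mk p.2).get? "prerequisites" with _ | v
    · rw [hv] at hcont; simp at hcont
    · have hd : (PySem.Dict.mk catalog).getD p.1 [] = p.2 := by
        simp [PySem.Dict.getD_eq_get?_getD, hget]
      have hd2 : (PySem.Dict.mk p.2).getD "prerequisites" ([] : List String) = v := by
        simp [PySem.Dict.getD_eq_get?_getD, hv]
      rw [hd, hd2]
      unfold pvCondB at h2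
      rw [hv] at h2
      simpa using h2
  · rintro ⟨hk, hc⟩
    rcases hg : (PySem.Dict.mk catalog).get? c with _ | info
    · exfalso
      have := (PySem.Dict.get?_eq_none_iff_not_mem_keys (PySem.Dict.mk catalog) c).mp hg
      exact this (by simpa [PySem.Dict.keys] using hk)
    · refine ⟨(c, info), by simpa using PySem.Dict.mem_items_of_get?_eq_some (PySem.Dict.mk catalog) hg, rfl, ?_⟩
      have hcont : (PySem.Dict.mk info).contains "prerequisites" = true := by
        rw [hg] at hpre; simpa using hpre
      rw [PySem.Dict.contains_eq_isSome_get?] at hcont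
      rcases hv : (PySem.Dict.mk info).get? "prerequisites" with _ | v
      · rw [hv] at hcont; simp at hcont
      · have hd : (PySem.Dict.mk catalog).getD c [] = info := by
          simp [PySem.Dict.getD_eq_get?_getD, hg]
        have hd2 : (PySem.Dict.mk info).getD "prerequisites" ([] : List String) = v := by
          simp [PySem.Dict.getD_eq_get?_getD, hv]
        rw [hd, hd2] at hc
        unfold pvCondB
        rw [hv]
        simpa using hc

-- ===== VERDICT (by name: the statement is the Claim_ definition above) =====
theorem check_prerequisites_spec : Claim_equal_check_prerequisites := by
  intro schedule catalog _ hpre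
  rcases hpre with ⟨hnd, hpre⟩
  unfold Spec_check_prerequisites check_prerequisites check_prerequisites_alt
  refine PySem.List.foldl_congr_mem schedule _ _ [] ?_
  intro acc sem hsem
  refine PySem.List.foldl_congr_mem sem _ _ acc ?_
  intro acc' c hc
  have hcf : c ∈ schedule.flatten := List.mem_flatten.mpr ⟨sem, hsem, hc⟩
  rw [pv_inner_scan schedule catalog c catalog acc']
  have hiff := pv_unmet_iff_condA schedule catalog hnd c (hpre c hcf)
  by_cases h : c ∈ catalog.map Prod.fst ∧
      ((PySem.Dict.mk ((PySem.Dict.mk catalog).getD c [])).getD "prerequisites" ([] : List String)) ∉ schedule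
  · rw [if_pos h, if_pos ((PySem.Set.contains_iff _ _).mpr (hiff.mpr h))]
  · rw [if_neg h, if_neg (fun hcon => h (hiff.mp ((PySem.Set.contains_iff _ _).mp hcon)))]
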